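-- pv_equiv track=rewrite | github.com/barzaazad/CSCI-B551 | Assignment 0/arrange_pichus.py | check_tl_diag
-- ===== SOURCE A (Python) =====
-- def check_tl_diag(house_map,row,col):
--     checker = False
--     # check top left diag
--     for r,c in zip(range(row-1,-1,-1), range(col-1,-1,-1)):
--         if house_map[r][c] == "p":
--             return checker
--         if house_map[r][c] in ["X","@"]:
--             checker = True
--
--     return True
-- ===== SOURCE B (Python) =====
-- def check_tl_diag(house_map, row, col):
--     # Diagonal cell k (k = 0, 1, ...) addressed by index arithmetic.
--     n = min(row, col)
--     cell = lambda k: house_map[row - 1 - k][col - 1 - k]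
--     # Search 1: index of the first "p" on the diagonal (stops there, touching no later cell).
--     p_idx = next((k for k in range(n) if cell(k) == "p"), None)
--     if p_idx is None:
--         return True
--     # Search 2: is there a blocker strictly before that index?
--     return next((k for k in range(p_idx) if cell(k) in ("X", "@")), None) is not None
-- ===== Notes on version B (the rewrite author's own statement) =====
-- stated objective: alternative
-- what changed: Replaced A's flag-threading scan over (r,c) pairs by index arithmetic with two independent searches: find the index of the first 'p' along the diagonal, then separately search for a blocker at a strictly smaller index; the result is the comparison of the two search outcomes.
import Mathlib
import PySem

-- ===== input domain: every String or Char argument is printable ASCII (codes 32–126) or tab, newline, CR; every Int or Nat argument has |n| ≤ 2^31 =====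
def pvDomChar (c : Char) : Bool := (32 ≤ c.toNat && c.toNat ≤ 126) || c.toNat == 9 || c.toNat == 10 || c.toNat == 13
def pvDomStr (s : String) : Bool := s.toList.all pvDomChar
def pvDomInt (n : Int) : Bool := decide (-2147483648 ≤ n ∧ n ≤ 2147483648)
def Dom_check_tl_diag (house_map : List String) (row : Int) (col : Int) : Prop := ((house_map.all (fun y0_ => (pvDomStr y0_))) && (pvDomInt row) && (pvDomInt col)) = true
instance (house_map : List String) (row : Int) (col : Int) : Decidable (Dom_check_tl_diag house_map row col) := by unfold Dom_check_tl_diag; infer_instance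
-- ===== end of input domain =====

-- ===== PORT A =====
-- house_map[r][c] as an Option (none = IndexError, excluded by Pre_)
def pvCell (house_map : List String) (r c : Int) : Option Char :=
  (PySem.List.pyGet? house_map r).bind (fun s => PySem.Str.pyGet? s c)

-- the for-loop of A: n remaining zipped steps, current (r,c), the 'checker' flag
def pvGoA (house_map : List String) : Nat → Int → Int → Bool → Bool
  | 0, _, _, _ => true
  | n+1, r, c, checker =>
    match pvCell house_map r c with
    | none => false   -- Python raises IndexError here; outside Pre_
    | some v =>
      if v = 'p' then checker
      else pvGoA house_map n (r-1) (c-1) (if v = 'X' ∨ v = '@' then true else checker)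

def check_tl_diag (house_map : List String) (row : Int) (col : Int) : Bool :=
  pvGoA house_map (min row col).toNat (row-1) (col-1) false

-- ===== PORT B =====
-- B's cell(k): diagonal cell k by index arithmetic (none = IndexError, excluded by Pre_)
def pvCellB (house_map : List String) (row col : Int) (k : Nat) : Option Char :=
  (PySem.List.pyGet? house_map (row - 1 - k)).bind (fun s => PySem.Str.pyGet? s (col - 1 - k))

-- next((k for k in range(...) if pred (cell k)), None): fuel = remaining indices, k = current index
def pvFindIdx (house_map : List String) (row col : Int) (pred : Char → Bool) : Nat → Nat → Option Nat
  | 0, _ => none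
  | n+1, k =>
    match pvCellB house_map row col k with
    | none => none   -- Python raises IndexError here; outside Pre_
    | some v => if pred v then some k else pvFindIdx house_map row col pred n (k+1)

def check_tl_diag_alt (house_map : List String) (row : Int) (col : Int) : Bool :=
  match pvFindIdx house_map row col (fun v => v == 'p') (min row col).toNat 0 with
  | none => true
  | some i => (pvFindIdx house_map row col (fun v => v == 'X' || v == '@') i 0).isSome

-- ===== PRECONDITION & SPEC =====
-- Pre_ excludes exactly the inputs where the Python raises IndexError: some diagonal cell
-- that the loop actually reaches (no 'p' strictly before it) is out of range.
-- (the 'row ≤ length' conjunct is implied by validity of the first visited cell; it only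
-- keeps the quantifier bound small so the condition is cheap to decide — no input A returns on is lost)
def Pre_check_tl_diag (house_map : List String) (row : Int) (col : Int) : Prop :=
  (min row col).toNat = 0 ∨
  (row ≤ (house_map.length : Int) ∧
    ∀ k < min (min row col).toNat house_map.length,
      (pvCellB house_map row col k).isSome = true ∨
      ∃ j < k, pvCellB house_map row col j = some 'p')
instance (house_map : List String) (row : Int) (col : Int) : Decidable (Pre_check_tl_diag house_map row col) := by unfold Pre_check_tl_diag; infer_instance

def pvWitness_check_tl_diag : List String × Int × Int := (["X..", ".@.", "..p"], 2, 2)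

def Spec_check_tl_diag (house_map : List String) (row : Int) (col : Int) (out : Bool) : Prop := out = check_tl_diag_alt house_map row col
instance (house_map : List String) (row : Int) (col : Int) (out : Bool) : Decidable (Spec_check_tl_diag house_map row col out) := by unfold Spec_check_tl_diag; infer_instance

-- ===== CLAIM (what is proved, stated in full; the proofs are below) =====
def Claim_equal_check_tl_diag : Prop := ∀ (house_map : List String) (row : Int) (col : Int), Dom_check_tl_diag house_map row col → Pre_check_tl_diag house_map row col → Spec_check_tl_diag house_map row col (check_tl_diag house_map row col)

-- ===== LEMMAS AND PROOFS =====

-- any index pvFindIdx returns is ≥ the start index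
theorem pvFindIdx_ge (house_map : List String) (row col : Int) (pred : Char → Bool) :
    ∀ (n k i : Nat), pvFindIdx house_map row col pred n k = some i → k ≤ i := by
  intro n
  induction n with
  | zero => intro k i h; simp [pvFindIdx] at h
  | succ n ih =>
    intro k i h
    cases hc : pvCellB house_map row col k with
    | none => simp [pvFindIdx, hc] at h
    | some v =>
      simp only [pvFindIdx, hc] at h
      by_cases hp : pred v
      · simp [hp] at h; omega
      · simp [hp] at h; have := ih (k+1) i h; omega

-- generalized invariant: A's scan from diagonal index k equals B's two-search comparison
theorem pvGoA_eq (house_map : List String) (row col : Int) :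
    ∀ (n k : Nat) (checker : Bool),
    (∀ j < n, (pvCellB house_map row col (k+j)).isSome = true ∨
              ∃ m < j, pvCellB house_map row col (k+m) = some 'p') →
    pvGoA house_map n (row - 1 - k) (col - 1 - k) checker =
      (match pvFindIdx house_map row col (fun v => v == 'p') n k with
       | none => true
       | some i => checker ||
           (pvFindIdx house_map row col (fun v => v == 'X' || v == '@') (i - k) k).isSome) := by
  intro n
  induction n with
  | zero => intro k checker _; simp [pvGoA, pvFindIdx]
  | succ n ih =>
    intro k checker hpre
    have h0 := hpre 0 (Nat.succ_pos n)
    simp only [Nat.add_zero] at h0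
    obtain ⟨v, hv⟩ : ∃ v, pvCellB house_map row col k = some v := by
      rcases h0 with h | ⟨m, hm, _⟩
      · exact Option.isSome_iff_exists.mp h
      · omega
    have hvA : pvCell house_map (row - 1 - k) (col - 1 - k) = some v := hv
    by_cases hp : v = 'p'
    · subst hp
      simp [pvGoA, pvFindIdx, hvA, hv]
    · have hpre' : ∀ j < n, (pvCellB house_map row col ((k+1)+j)).isSome = true ∨
          ∃ m < j, pvCellB house_map row col ((k+1)+m) = some 'p' := by
        intro j hj
        rcases hpre (j+1) (by omega) with h | ⟨m, hm, hmp⟩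
        · left; have e : k + (j+1) = (k+1)+j := by omega
          rw [e] at h; exact h
        · rcases Nat.eq_zero_or_pos m with hm0 | hm0
          · subst hm0
            simp only [Nat.add_zero] at hmp
            rw [hv] at hmp
            exact absurd (Option.some.inj hmp) hp
          · right
            refine ⟨m-1, by omega, ?_⟩
            have e : (k+1)+(m-1) = k+m := by omega
            rw [e]; exact hmp
      have e1 : row - 1 - (k:Int) - 1 = row - 1 - ((k+1 : Nat) : Int) := by push_cast; ring
      have e2 : col - 1 - (k:Int) - 1 = col - 1 - ((k+1 : Nat) : Int) := by push_cast; ring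
      have ihr := ih (k+1) (if v = 'X' ∨ v = '@' then true else checker) hpre'
      have hvp : (v == 'p') = false := by simp [hp]
      simp only [pvGoA, pvFindIdx, hvA, hv, if_neg hp, hvp, e1, e2]
      rw [ihr]
      cases hfp : pvFindIdx house_map row col (fun v => v == 'p') n (k+1) with
      | none => simp
      | some i =>
        have hik : k + 1 ≤ i := pvFindIdx_ge house_map row col _ n (k+1) i hfp
        simp only [Bool.false_eq_true, if_false]
        have eu : i - k = (i - (k+1)) + 1 := by omega
        rw [eu]
        simp only [pvFindIdx, hv]
        by_cases hx : v = 'X' ∨ v = '@'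
        · have hxb : (v == 'X' || v == '@') = true := by
            rcases hx with h | h <;> simp [h]
          rw [if_pos hx, if_pos hxb]
          simp
        · have hxb : (v == 'X' || v == '@') = false := by
            simp only [not_or] at hx; simp [hx.1, hx.2]
          rw [if_neg hx]
          simp [hxb]

-- ===== VERDICT (by name: the statement is the Claim_ definition above) =====
theorem check_tl_diag_spec : Claim_equal_check_tl_diag := by
  intro house_map row col _ hpre
  unfold Spec_check_tl_diag check_tl_diag check_tl_diag_alt
  rcases hpre with h0 | ⟨hrow, h⟩
  · rw [h0]; simp [pvGoA, pvFindIdx]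
  · have hmono : min row col ≤ row := min_le_left _ _
    have hle : (min row col).toNat ≤ house_map.length := by omega
    have hg := pvGoA_eq house_map row col (min row col).toNat 0 false
      (by
        intro j hj
        have := h j (by omega)
        simpa using this)
    simpa using hg
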